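-- pv_equiv track=rewrite | github.com/yjsayya/Algorithms | 1. Programmers/lv1/lv1(정답률60%이상)/lv1_과일장수.py | solution1
-- ===== SOURCE A (Python) =====
-- def solution1(k, m, score):
--
--     price = 0
--     score.sort()
--
--     while len(score) >= m:
--         box = score[-m:]
--         price += min(box)*m
--         score = score[:-m]
--
--     return price
-- ===== SOURCE B (Python) =====
-- def solution1(k, m, score):
--     s = sorted(score)
--     n = len(s)
--     return m * sum(s[n - i * m] for i in range(1, n // m + 1))
-- ===== Notes on version B (the rewrite author's own statement) =====
-- stated objective: simpler
-- what changed: A repeatedly slices off the top-m chunk of the sorted list and calls min on each slice; B sorts once and sums the chunk minima sorted[n-i*m] directly by index in a single expression, with no loop state or list copying.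
import Mathlib
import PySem

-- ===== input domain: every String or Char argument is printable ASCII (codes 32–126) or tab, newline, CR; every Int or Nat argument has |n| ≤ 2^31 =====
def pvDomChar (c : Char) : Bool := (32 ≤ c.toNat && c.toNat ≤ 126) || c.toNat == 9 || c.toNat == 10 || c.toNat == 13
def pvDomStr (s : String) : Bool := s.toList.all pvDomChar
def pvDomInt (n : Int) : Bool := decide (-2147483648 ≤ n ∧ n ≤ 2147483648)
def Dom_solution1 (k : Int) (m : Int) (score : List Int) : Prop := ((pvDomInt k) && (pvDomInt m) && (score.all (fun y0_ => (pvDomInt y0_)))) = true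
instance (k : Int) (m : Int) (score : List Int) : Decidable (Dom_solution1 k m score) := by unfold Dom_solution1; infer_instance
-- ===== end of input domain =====

-- B sorts once and sums the chunk minima by index instead of A's repeated slice-and-min loop (simpler, no copying);
-- A also sorts its `score` argument in place (observable Python-side mutation): the equivalence proved is about the RETURN value only.

-- ===== PORT A =====
-- while len(score) >= m: box = score[-m:]; price += min(box)*m; score = score[:-m]
-- (the '1 ≤ m' conjunct is a totality guard only: for m ≤ 0 the Python loop raises, which Pre_solution1 excludes)
def solution1_loop (m : Int) (score : List Int) (price : Int) : Int :=
  if h : 1 ≤ m ∧ m ≤ (score.length : Int) then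
    solution1_loop m (PySem.List.slice score none (some (-m)))
      (price + ((PySem.List.min? (PySem.List.slice score (some (-m)) none) (fun x => x)).getD 0) * m)
  else price
termination_by score.length
decreasing_by
  have hm1 : 0 < m.toNat := by omega
  have hmi : -(m.toNat : Int) = -m := by omega
  rw [← hmi, PySem.List.slice_to_neg_natCast score m.toNat hm1, List.length_take]
  omega

def solution1 (k : Int) (m : Int) (score : List Int) : Int :=
  solution1_loop m (PySem.List.sorted score (fun x => x) false) 0

-- ===== PORT B =====
-- s = sorted(score); n = len(s); return m * sum(s[n - i*m] for i in range(1, n//m + 1))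
def solution1_alt (k : Int) (m : Int) (score : List Int) : Int :=
  let s := PySem.List.sorted score (fun x => x) false
  let n : Int := PySem.List.len s
  m * ((PySem.List.pyRange 1 (PySem.Int.floordiv n m + 1) 1).foldl
        (fun acc i => acc + (PySem.List.pyGet? s (n - i * m)).getD 0) 0)

-- ===== PRECONDITION & SPEC =====
-- Pre_ excludes exactly m ≤ 0: there Python A always raises ValueError (min of an eventually-empty slice).
def Pre_solution1 (k : Int) (m : Int) (score : List Int) : Prop := 1 ≤ m
instance (k : Int) (m : Int) (score : List Int) : Decidable (Pre_solution1 k m score) := by unfold Pre_solution1; infer_instance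
def pvWitness_solution1 : Int × Int × List Int := (0, 2, [3, 1, 2, 4, 5])
def Spec_solution1 (k : Int) (m : Int) (score : List Int) (out : Int) : Prop := out = solution1_alt k m score
instance (k : Int) (m : Int) (score : List Int) (out : Int) : Decidable (Spec_solution1 k m score out) := by unfold Spec_solution1; infer_instance

-- ===== CLAIM (what is proved, stated in full; the proofs are below) =====
def Claim_equal_solution1 : Prop := ∀ (k : Int) (m : Int) (score : List Int), Dom_solution1 k m score → Pre_solution1 k m score → Spec_solution1 k m score (solution1 k m score)

-- ===== LEMMAS AND PROOFS =====

-- min of a nonempty list whose head is a lower bound (a sorted chunk) is its head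
lemma min_head_of_lb (x : Int) (t : List Int) (h : ∀ y ∈ t, x ≤ y) :
    PySem.List.min? (x :: t) (fun y => y) = some x := by
  rw [PySem.List.min?_id_cons]
  rcases PySem.List.foldl_min_mem t x with h1 | h1
  · rw [h1]
  · have h2 := (PySem.List.foldl_min_le t x).1
    have h3 := h _ h1
    exact congrArg some (le_antisymm h2 h3)

-- B's chunk-minima sum, as a function of the sorted list
def chunkSum (m : Int) (s : List Int) : Int :=
  (PySem.List.pyRange 1 (PySem.Int.floordiv (s.length : Int) m + 1) 1).foldl
    (fun acc i => acc + (PySem.List.pyGet? s ((s.length : Int) - i * m)).getD 0) 0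

-- peeling one chunk off B's sum
lemma chunkSum_step (m : Int) (hm : 1 ≤ m) (s : List Int) (hlen : m ≤ (s.length : Int))
    (hjlt : s.length - m.toNat < s.length) :
    chunkSum m s = s[s.length - m.toNat]'hjlt + chunkSum m (s.take (s.length - m.toNat)) := by
  set N : Int := (s.length : Int) with hN
  set j : Nat := s.length - m.toNat with hj
  set q : Int := PySem.Int.floordiv N m with hq
  obtain ⟨hqm, hqm'⟩ := (PySem.Int.floordiv_eq_iff_of_pos (by omega : (0:Int) < m)).mp hq.symm
  have hq1 : 1 ≤ q := (PySem.Int.le_floordiv_iff_mul_le (by omega)).mpr (by omega)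
  have hjc : ((s.take j).length : Int) = N - m := by
    rw [List.length_take]; omega
  have hq' : PySem.Int.floordiv ((s.take j).length : Int) m = q - 1 := by
    rw [hjc, PySem.Int.floordiv_eq_iff_of_pos (by omega : (0:Int) < m)]
    constructor <;> nlinarith
  unfold chunkSum
  rw [hq', ← hN, ← hq, hjc]
  have hr1 : (q - 1) + 1 = q := by ring
  rw [hr1, PySem.List.foldl_add, PySem.List.foldl_add,
      PySem.List.pyRange_one_cons (by omega : (1:Int) < q + 1)]
  simp only [List.map_cons, List.sum_cons, one_mul]
  -- head term: s[N - m] = s[j]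
  have hhead : (PySem.List.pyGet? s (N - m)).getD 0 = s[j]'hjlt := by
    rw [PySem.List.pyGet?_of_nonneg s (by omega : (0:Int) ≤ N - m)]
    have : (N - m).toNat = j := by omega
    rw [this, List.getElem?_eq_getElem hjlt, Option.getD_some]
  -- tail: reindex range(2, q+1) to range(1, q)
  have htail : (PySem.List.pyRange (1+1) (q + 1)).map (fun i => (PySem.List.pyGet? s (N - i * m)).getD 0)
      = (PySem.List.pyRange 1 q).map (fun i => (PySem.List.pyGet? (s.take j) (N - m - i * m)).getD 0) := by
    rw [PySem.List.pyRange_one (1+1) (q+1), PySem.List.pyRange_one 1 q,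
        List.map_map, List.map_map]
    have hlenq : (q + 1 - (1 + 1)).toNat = (q - 1).toNat := by omega
    rw [hlenq]
    apply List.map_congr_left
    intro a ha
    have hk : (a : Int) < q - 1 := by
      have := List.mem_range.mp ha; omega
    simp only [Function.comp_apply]
    have hidx : N - (1 + 1 + (a:Int)) * m = N - m - (1 + (a:Int)) * m := by ring
    rw [hidx]
    set idx : Int := N - m - (1 + (a:Int)) * m with hidxd
    have hple : (2 + (a:Int)) * m ≤ q * m := by nlinarith
    have hnn : 0 ≤ idx := by nlinarith
    have hub : idx < N - m := by nlinarith
    rw [PySem.List.pyGet?_of_nonneg s hnn, PySem.List.pyGet?_of_nonneg (s.take j) hnn,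
        List.getElem?_take_of_lt (by omega : idx.toNat < j)]
  rw [htail, hhead]
  ring

-- loop invariant: A's remaining loop adds m * (B's chunk sum of the remaining sorted prefix)
lemma loop_eq (m : Int) (hm : 1 ≤ m) (s : List Int) (hsort : s.Pairwise (· ≤ ·)) (p : Int) :
    solution1_loop m s p = p + m * chunkSum m s := by
  by_cases hlen : m ≤ (s.length : Int)
  · have hm1 : 0 < m.toNat := by omega
    have hmi : -(m.toNat : Int) = -m := by omega
    rw [solution1_loop, dif_pos ⟨hm, hlen⟩, ← hmi,
        PySem.List.slice_to_neg_natCast s m.toNat hm1,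
        PySem.List.slice_from_neg_natCast s m.toNat hm1]
    set j := s.length - m.toNat with hj
    have hjlt : j < s.length := by omega
    have hdrop : s.drop j = s[j] :: s.drop (j + 1) := List.drop_eq_getElem_cons hjlt
    have hdp : (s.drop j).Pairwise (· ≤ ·) := hsort.drop
    rw [hdrop] at hdp
    have hmin : PySem.List.min? (s.drop j) (fun y => y) = some (s[j]'hjlt) := by
      rw [hdrop]; exact min_head_of_lb _ _ (List.pairwise_cons.mp hdp).1
    rw [hmin]
    have htp : (s.take j).Pairwise (· ≤ ·) := hsort.sublist (List.take_sublist j s)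
    rw [loop_eq m hm (s.take j) htp]
    rw [chunkSum_step m hm s hlen hjlt]
    simp only [Option.getD_some]
    ring
  · rw [solution1_loop, dif_neg (by omega)]
    have hq : PySem.Int.floordiv ((s.length : Int)) m = 0 := by
      rw [PySem.Int.floordiv_eq_iff_of_pos (by omega : (0:Int) < m)]
      constructor <;> omega
    simp [chunkSum, hq]
termination_by s.length
decreasing_by rw [List.length_take]; omega

-- ===== VERDICT (by name: the statement is the Claim_ definition above) =====
theorem solution1_spec : Claim_equal_solution1 := by
  intro k m score _ hpre
  unfold Spec_solution1 solution1 solution1_alt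
  simp only [PySem.List.len_eq]
  rw [loop_eq m hpre _ (PySem.List.sorted_pairwise score (fun x => x))]
  simp [chunkSum]
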